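-- pv_equiv track=rewrite | github.com/operate-first/ai-for-cloud-ops | RTQA/CouchDB_Code/fetch_deamon.py | versions_from_pip
-- ===== SOURCE A (Python) =====
-- def versions_from_pip(p_versions):
--     p_versions_split = p_versions.split()
--     begin = False
--     res = list()
--     for phrase in p_versions_split:
--
--         if 'INSTALLED' in phrase:
--             break
--
--         if begin:
--             ver = phrase.strip(',')
--             res.append(ver)
--
--         if 'versions:' in phrase:
--             begin = True
--
--     return res
-- ===== SOURCE B (Python) =====
-- def versions_from_pip(p_versions):
--     tokens = p_versions.split()
--     stop = next((i for i, t in enumerate(tokens) if 'INSTALLED' in t), len(tokens))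
--     head = tokens[:stop]
--     start = next((i for i, t in enumerate(head) if 'versions:' in t), None)
--     return [] if start is None else [t.strip(',') for t in head[start + 1:]]
-- ===== Notes on version B (the rewrite author's own statement) =====
-- stated objective: idiomatic
-- what changed: Replaces the flag-threading loop with break by computing boundaries: find the index of the first INSTALLED token, slice before it, find the first marker token in that prefix, and map comma-strip over the tokens after it.
import Mathlib
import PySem

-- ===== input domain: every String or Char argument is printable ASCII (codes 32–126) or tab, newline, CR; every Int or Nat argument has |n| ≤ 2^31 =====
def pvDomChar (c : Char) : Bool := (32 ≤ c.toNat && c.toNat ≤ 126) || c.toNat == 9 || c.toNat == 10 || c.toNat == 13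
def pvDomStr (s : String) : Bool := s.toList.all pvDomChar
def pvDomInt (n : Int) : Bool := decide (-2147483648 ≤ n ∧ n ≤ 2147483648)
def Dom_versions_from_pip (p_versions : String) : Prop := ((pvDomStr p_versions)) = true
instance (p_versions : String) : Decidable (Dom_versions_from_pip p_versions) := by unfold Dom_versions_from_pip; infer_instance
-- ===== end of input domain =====

-- B is an idiomatic re-decomposition: it computes the cut points (first INSTALLED token,
-- first 'versions:' token) and slices, instead of threading a begin flag with break.

-- ===== PORT A =====
-- the for-loop with `break` and the `begin` flag, as structural recursion over the tokens
def versionsGoA : List String → Bool → List String → List String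
  | [], _, res => res
  | phrase :: rest, b, res =>
    if PySem.Str.isIn "INSTALLED" phrase then res
    else
      let res' := if b then res ++ [PySem.Str.stripChars phrase ","] else res
      let b' := if PySem.Str.isIn "versions:" phrase then true else b
      versionsGoA rest b' res'

def versions_from_pip (p_versions : String) : List String :=
  versionsGoA (PySem.Str.split₀ p_versions) false []

-- ===== PORT B =====
def versions_from_pip_alt (p_versions : String) : List String :=
  let tokens := PySem.Str.split₀ p_versions
  let stop := (tokens.findIdx? (fun t => PySem.Str.isIn "INSTALLED" t)).getD tokens.length
  let head := tokens.take stop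
  match head.findIdx? (fun t => PySem.Str.isIn "versions:" t) with
  | none => []
  | some i => (head.drop (i + 1)).map (fun t => PySem.Str.stripChars t ",")

-- ===== PRECONDITION & SPEC =====
def Spec_versions_from_pip (p_versions : String) (out : List String) : Prop := out = versions_from_pip_alt p_versions
instance (p_versions : String) (out : List String) : Decidable (Spec_versions_from_pip p_versions out) := by unfold Spec_versions_from_pip; infer_instance

-- ===== CLAIM (what is proved, stated in full; the proofs are below) =====
def Claim_equal_versions_from_pip : Prop := ∀ (p_versions : String), Dom_versions_from_pip p_versions → Spec_versions_from_pip p_versions (versions_from_pip p_versions)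

-- ===== LEMMAS AND PROOFS =====

-- take up to the first index satisfying p = takeWhile (!p)
theorem take_findIdx?_eq_takeWhile {α : Type} (p : α → Bool) (ts : List α) :
    ts.take ((ts.findIdx? p).getD ts.length) = ts.takeWhile (fun t => !p t) := by
  induction ts with
  | nil => simp
  | cons t ts ih =>
    by_cases h : p t = true
    · simp [List.findIdx?_cons, h]
    · simp only [List.findIdx?_cons, h, Bool.false_eq_true, if_false, List.takeWhile_cons,
        Bool.not_eq_eq_eq_not, Bool.not_true]
      cases hfi : ts.findIdx? p with
      | none => simpa [hfi] using congrArg (List.cons t) ih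
      | some i => simpa [hfi] using congrArg (List.cons t) ih

-- body of B on a token list (after the INSTALLED cut)
def versionsBodyB (head : List String) : List String :=
  match head.findIdx? (fun t => PySem.Str.isIn "versions:" t) with
  | none => []
  | some i => (head.drop (i + 1)).map (fun t => PySem.Str.stripChars t ",")

-- after `begin` is set, A appends strip(',') of every token up to the first INSTALLED
theorem goA_true (ts : List String) (res : List String) :
    versionsGoA ts true res =
      res ++ (ts.takeWhile (fun t => !PySem.Str.isIn "INSTALLED" t)).map
        (fun t => PySem.Str.stripChars t ",") := by
  induction ts generalizing res with
  | nil => simp [versionsGoA]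
  | cons t ts ih =>
    cases hI : PySem.Str.isIn "INSTALLED" t with
    | true => simp [versionsGoA, hI, -PySem.Str.isIn_eq]
    | false => simp [versionsGoA, hI, ih, -PySem.Str.isIn_eq]

-- before `begin` is set, A computes B's body on the INSTALLED-truncated token list
theorem goA_false (ts : List String) :
    versionsGoA ts false [] =
      versionsBodyB (ts.takeWhile (fun t => !PySem.Str.isIn "INSTALLED" t)) := by
  induction ts with
  | nil => simp [versionsGoA, versionsBodyB]
  | cons t ts ih =>
    cases hI : PySem.Str.isIn "INSTALLED" t with
    | true => simp [versionsGoA, versionsBodyB, hI, -PySem.Str.isIn_eq]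
    | false =>
      cases hv : PySem.Str.isIn "versions:" t with
      | true =>
        simp [versionsGoA, versionsBodyB, hI, hv, List.findIdx?_cons, goA_true,
          -PySem.Str.isIn_eq]
      | false =>
        simp only [versionsGoA, versionsBodyB, List.takeWhile_cons, List.findIdx?_cons, hI, hv,
          Bool.false_eq_true, if_false, Bool.not_false, if_true, ih]
        cases hfi : (ts.takeWhile (fun t => !PySem.Str.isIn "INSTALLED" t)).findIdx?
            (fun t => PySem.Str.isIn "versions:" t) with
        | none => simp [-PySem.Str.isIn_eq]
        | some i => simp [-PySem.Str.isIn_eq]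

-- ===== VERDICT (by name: the statement is the Claim_ definition above) =====
theorem versions_from_pip_spec : Claim_equal_versions_from_pip := by
  intro p _
  unfold Spec_versions_from_pip versions_from_pip versions_from_pip_alt
  simp only [take_findIdx?_eq_takeWhile]
  rw [goA_false]
  rfl
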